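-- pv_equiv track=rewrite | github.com/SatishNawale/My_Workspace | Python_Programming_Assignment_2/Assignment2_10.py | Num_of_digits
-- ===== SOURCE A (Python) =====
-- def Num_of_digits(No):
--     # To check number is negative or not
--     flag = 0
--     if No<0:
--         No = -No
--         flag=1
--
--     # To find sum of digits in given numbers
--     temp = No
--     temp1 = 0
--     sum = 0
--     while(temp != 0):
--         temp1 = temp%10
--         sum = sum + temp1
--         temp = temp//10
--
--     # flag is 1 then returning negative sum
--     if flag == 1:
--         return -sum
--     else:
--         return sum
-- ===== SOURCE B (Python) =====
-- def digitsum(n):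
--     return 0 if n == 0 else n % 10 + digitsum(n // 10)
--
-- def Num_of_digits(No):
--     if No < 0:
--         return -digitsum(-No)
--     return digitsum(No)
-- ===== Notes on version B (the rewrite author's own statement) =====
-- stated objective: simpler
-- what changed: Replaced the flag variable and the imperative while loop with accumulator variables by a plain recursive digit-sum helper, re-applying the sign directly in the outer function.
import Mathlib
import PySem

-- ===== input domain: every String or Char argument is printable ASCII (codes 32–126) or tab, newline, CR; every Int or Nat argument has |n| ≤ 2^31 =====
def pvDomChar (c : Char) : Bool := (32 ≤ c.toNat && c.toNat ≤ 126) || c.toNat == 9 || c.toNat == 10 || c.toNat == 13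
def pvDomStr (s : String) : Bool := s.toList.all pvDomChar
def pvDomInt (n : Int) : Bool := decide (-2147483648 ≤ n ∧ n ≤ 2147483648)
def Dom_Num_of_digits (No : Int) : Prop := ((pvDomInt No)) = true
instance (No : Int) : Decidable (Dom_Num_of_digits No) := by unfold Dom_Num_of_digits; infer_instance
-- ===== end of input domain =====

-- B replaces A's flag + while-loop accumulator with a plain recursive digit-sum helper (objective: simpler).


-- ===== PORT A =====
-- A's while loop; `temp` is nonnegative at every iteration (A negates No first), so
-- Python's % and // on temp are exactly Nat's % and / here (exact on the loop's actual states).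
-- `fuel` only makes the recursion structural; it starts at temp and temp strictly decreases, so it never runs out.
def pvALoop : Nat → Nat → Int → Int
  | 0, _, sum => sum
  | fuel + 1, temp, sum =>
    if temp ≠ 0 then pvALoop fuel (temp / 10) (sum + (temp % 10 : Nat)) else sum

def Num_of_digits (No : Int) : Int :=
  let flag : Int := if No < 0 then 1 else 0
  let No' : Int := if No < 0 then -No else No
  let sum : Int := pvALoop No'.toNat No'.toNat 0
  if flag = 1 then -sum else sum

-- ===== PORT B =====
-- Source B's recursive digit sum; n ≥ 0 at every call (the sign is stripped first), so Nat % and / are exact.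
-- `fuel` only makes the recursion structural; it starts at n and n strictly decreases, so it never runs out.
def pvDigitsum : Nat → Nat → Int
  | 0, _ => 0
  | fuel + 1, n =>
    if n = 0 then 0 else ((n % 10 : Nat) : Int) + pvDigitsum fuel (n / 10)

def Num_of_digits_alt (No : Int) : Int :=
  if No < 0 then -(pvDigitsum (-No).toNat (-No).toNat) else pvDigitsum No.toNat No.toNat
-- ===== PRECONDITION & SPEC =====
def Spec_Num_of_digits (No : Int) (out : Int) : Prop := out = Num_of_digits_alt No
instance (No : Int) (out : Int) : Decidable (Spec_Num_of_digits No out) := by unfold Spec_Num_of_digits; infer_instance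

-- ===== CLAIM (what is proved, stated in full; the proofs are below) =====
def Claim_equal_Num_of_digits : Prop := ∀ (No : Int), Dom_Num_of_digits No → Spec_Num_of_digits No (Num_of_digits No)

-- ===== LEMMAS AND PROOFS =====
theorem pvALoop_eq (fuel : Nat) : ∀ (t : Nat) (s : Int), pvALoop fuel t s = s + pvDigitsum fuel t := by
  induction fuel with
  | zero => intro t s; simp [pvALoop, pvDigitsum]
  | succ f ih =>
    intro t s
    by_cases h : t = 0
    · simp [pvALoop, pvDigitsum, h]
    · simp only [pvALoop, pvDigitsum, h, if_neg, ne_eq, not_false_eq_true, if_true, if_false]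
      rw [ih]
      ring

-- ===== VERDICT (by name: the statement is the Claim_ definition above) =====
theorem Num_of_digits_spec : Claim_equal_Num_of_digits := by
  intro No _
  unfold Spec_Num_of_digits Num_of_digits Num_of_digits_alt
  by_cases h : No < 0 <;> simp [h, pvALoop_eq]
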